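-- pv_equiv track=rewrite | github.com/ATPs/xiaolongTools | WenlinTools.Python3/scripts/rephased2longestFasta.py | find_longest_contig
-- ===== SOURCE A (Python) =====
-- def find_longest_contig(adict):
--     indexes = list(adict.keys())
--     indexes.sort()
--     i = 0
--     j = 0
--     current_phase = None
--     allcontigs = []
--     for index in indexes:
--         char1, char2, phase = adict[index]
--         if current_phase == None:
--             current_phase = phase
--             i = index
--             j = index
--
--         else:
--             #has current_phase
--             if current_phase == phase:
--                 j = index
--             else: #phase changed
--                 allcontigs.append((i, j))
--                 i = index
--                 j = index
--                 current_phase = phase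
--
--     allcontigs.append((i, j))
--
--     i, j = max(allcontigs, key=lambda x: x[1] - x[0])
--     return i, j
-- ===== SOURCE B (Python) =====
-- def find_longest_contig(adict):
--     items = sorted(adict.items(), key=lambda kv: kv[0])
--     if not items:
--         return (0, 0)
--
--     def solve(lo, hi):
--         # runs of items[lo:hi] as (start_key, end_key, phase), hi > lo
--         if hi - lo == 1:
--             key, val = items[lo]
--             return [(key, key, val[2])]
--         mid = (lo + hi) // 2
--         left = solve(lo, mid)
--         right = solve(mid, hi)
--         if left[-1][2] == right[0][2]:
--             return left[:-1] + [(left[-1][0], right[0][1], right[0][2])] + right[1:]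
--         return left + right
--
--     runs = solve(0, len(items))
--     return max(((i, j) for i, j, _ in runs), key=lambda x: x[1] - x[0])
-- ===== Notes on version B (the rewrite author's own statement) =====
-- stated objective: alternative
-- what changed: A is a left-to-right state machine over sorted keys (current phase, run bounds, accumulator flushed on each phase change); B sorts the items and computes the run decomposition by divide and conquer, recursively solving the two halves and merging the boundary runs when their phases match, then takes the first max-span run.
import Mathlib
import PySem

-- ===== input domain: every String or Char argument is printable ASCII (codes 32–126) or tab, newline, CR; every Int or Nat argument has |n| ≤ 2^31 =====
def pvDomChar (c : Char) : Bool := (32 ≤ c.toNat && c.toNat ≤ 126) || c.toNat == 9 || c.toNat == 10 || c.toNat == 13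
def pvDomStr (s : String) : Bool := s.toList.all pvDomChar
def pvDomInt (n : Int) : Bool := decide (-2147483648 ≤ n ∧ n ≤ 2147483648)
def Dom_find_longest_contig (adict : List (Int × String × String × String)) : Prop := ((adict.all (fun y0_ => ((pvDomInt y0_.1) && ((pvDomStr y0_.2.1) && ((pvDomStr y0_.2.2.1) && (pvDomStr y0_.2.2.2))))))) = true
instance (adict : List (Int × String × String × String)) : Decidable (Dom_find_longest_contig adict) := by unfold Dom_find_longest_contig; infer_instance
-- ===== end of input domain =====

-- B replaces A's left-to-right phase-state-machine accumulation with a divide-and-conquer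
-- computation of the run decomposition (solve halves, merge boundary runs of equal phase);
-- same cost, different algorithm (objective: alternative).


-- ===== PORT A =====
-- The dict parameter arrives as an association list; PySem.Dict.ofList rebuilds the Python dict
-- (insertion order, duplicate keys overwrite in place) exactly.
def find_longest_contig (adict : List (Int × String × String × String)) : Int × Int :=
  let d := PySem.Dict.ofList adict
  let indexes := PySem.List.sorted (PySem.Dict.keys d) (fun k => k) false
  let st := indexes.foldl
    (fun (st : Int × Int × Option String × List (Int × Int)) index =>
      let phase := (PySem.Dict.getD d index ("", "", "")).2.2
      match st.2.2.1 with
      | none => (index, index, some phase, st.2.2.2)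
      | some p =>
        if p == phase then (st.1, index, some p, st.2.2.2)
        else (index, index, some phase, st.2.2.2 ++ [(st.1, st.2.1)]))
    (0, 0, none, [])
  let allcontigs := st.2.2.2 ++ [(st.1, st.2.1)]
  -- allcontigs is nonempty, so Python's max never raises; max? is some here
  match PySem.List.max? allcontigs (fun x => x.2 - x.1) with
  | some m => m
  | none => (0, 0)

-- ===== PORT B =====
-- Source B's recursive solve(lo, hi): runs of items[lo:hi] as (start_key, end_key, phase).
-- Python only ever calls it with lo < hi; the 'hi ≤ lo → []' guard makes the same
-- computation total and is never reached on Python's call tree.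
def pvSolveB (items : List (Int × String × String × String)) (lo hi : Nat) :
    List (Int × Int × String) :=
  if hi - lo = 1 then
    let y := items.getD lo (0, "", "", "")
    [(y.1, y.1, y.2.2.2)]
  else if hi ≤ lo then []  -- unreachable totality guard
  else
    let mid := (lo + hi) / 2
    let left := pvSolveB items lo mid
    let right := pvSolveB items mid hi
    match left.getLast?, right with
    | some la, r0 :: rt =>
      if la.2.2 == r0.2.2 then left.dropLast ++ (la.1, r0.2.1, r0.2.2) :: rt
      else left ++ right
    | _, _ => left ++ right
termination_by hi - lo
decreasing_by all_goals omega

def find_longest_contig_alt (adict : List (Int × String × String × String)) : Int × Int :=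
  let d := PySem.Dict.ofList adict
  let items := PySem.List.sorted (PySem.Dict.items d) (fun kv => kv.1) false
  match items with
  | [] => (0, 0)
  | _ :: _ =>
    let runs := pvSolveB items 0 items.length
    -- runs is nonempty, so Python's max never raises; max? is some here
    match PySem.List.max? (runs.map (fun r => (r.1, r.2.1))) (fun x => x.2 - x.1) with
    | some m => m
    | none => (0, 0)

-- ===== PRECONDITION & SPEC =====
def Spec_find_longest_contig (adict : List (Int × String × String × String)) (out : Int × Int) : Prop := out = find_longest_contig_alt adict
instance (adict : List (Int × String × String × String)) (out : Int × Int) : Decidable (Spec_find_longest_contig adict out) := by unfold Spec_find_longest_contig; infer_instance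

-- ===== CLAIM (what is proved, stated in full; the proofs are below) =====
def Claim_equal_find_longest_contig : Prop := ∀ (adict : List (Int × String × String × String)), Dom_find_longest_contig adict → Spec_find_longest_contig adict (find_longest_contig adict)

-- ===== LEMMAS AND PROOFS =====

-- proof-side linear model of the run decomposition: prepend one item to a run list
def pvComb (i j : Int) (p : String) (L : List (Int × Int × String)) : List (Int × Int × String) :=
  match L with
  | [] => [(i, j, p)]
  | r :: t => if p == r.2.2 then (i, r.2.1, r.2.2) :: t else (i, j, p) :: r :: t

def pvRunsP : List (Int × String × String × String) → List (Int × Int × String)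
  | [] => []
  | y :: rest => pvComb y.1 y.1 y.2.2.2 (pvRunsP rest)

-- the merge step of Source B, as a function (the port's match, verbatim)
def pvGlue (L R : List (Int × Int × String)) : List (Int × Int × String) :=
  match L.getLast?, R with
  | some la, r0 :: rt =>
    if la.2.2 == r0.2.2 then L.dropLast ++ (la.1, r0.2.1, r0.2.2) :: rt
    else L ++ R
  | _, _ => L ++ R

theorem pvComb_head (i j : Int) (p : String) (L : List (Int × Int × String)) :
    ∃ b t, pvComb i j p L = (i, b, p) :: t := by
  cases L with
  | nil => exact ⟨j, [], rfl⟩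
  | cons r t =>
    by_cases h : p == r.2.2
    · refine ⟨r.2.1, t, ?_⟩
      have hp : r.2.2 = p := by simpa [eq_comm] using (beq_iff_eq.mp h)
      simp [pvComb, hp]
    · exact ⟨j, r :: t, by simp [pvComb, h]⟩

theorem pvRunsP_ne_nil (y : Int × String × String × String)
    (rest : List (Int × String × String × String)) : pvRunsP (y :: rest) ≠ [] := by
  obtain ⟨b, t, h⟩ := pvComb_head y.1 y.1 y.2.2.2 (pvRunsP rest)
  simp [pvRunsP, h]

theorem pvGlue_cons_cons (x y : Int × Int × String) (t R : List (Int × Int × String)) :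
    pvGlue (x :: y :: t) R = x :: pvGlue (y :: t) R := by
  cases R with
  | nil => simp [pvGlue]
  | cons r0 rt =>
    have hL : (x :: y :: t).getLast? = (y :: t).getLast? := by
      simp [List.getLast?_cons_cons]
    cases hg : (y :: t).getLast? with
    | none => simp at hg
    | some la =>
      simp only [pvGlue, hL, hg]
      by_cases h : la.2.2 == r0.2.2 <;> simp [h, List.dropLast_cons_of_ne_nil]

-- commuting pvComb past pvGlue (R nonempty)
theorem pvComb_glue (i j : Int) (p : String) (L R : List (Int × Int × String))
    (hR : R ≠ []) : pvComb i j p (pvGlue L R) = pvGlue (pvComb i j p L) R := by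
  cases R with
  | nil => exact absurd rfl hR
  | cons r0 rt =>
    induction L with
    | nil =>
      by_cases h : p = r0.2.2 <;> simp_all [pvComb, pvGlue]
    | cons l0 lt ih =>
      cases lt with
      | nil =>
        by_cases hpl : p = l0.2.2 <;> by_cases hlr : l0.2.2 = r0.2.2 <;>
          simp_all [pvGlue, pvComb]
      | cons l1 lt' =>
        rw [pvGlue_cons_cons]
        by_cases hpl : (p == l0.2.2) = true
        · simp only [pvComb, hpl, if_pos]
          rw [pvGlue_cons_cons]
        · simp only [pvComb, hpl, Bool.false_eq_true, if_false]
          rw [pvGlue_cons_cons, pvGlue_cons_cons]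

-- the linear run decomposition splits along ++ exactly as Source B's merge
theorem pvRunsP_append (xs ys : List (Int × String × String × String)) (hys : ys ≠ []) :
    pvRunsP (xs ++ ys) = pvGlue (pvRunsP xs) (pvRunsP ys) := by
  induction xs with
  | nil => simp [pvRunsP, pvGlue]
  | cons y xs ih =>
    simp only [List.cons_append, pvRunsP, ih]
    exact pvComb_glue y.1 y.1 y.2.2.2 (pvRunsP xs) (pvRunsP ys)
      (by cases ys with | nil => exact absurd rfl hys | cons z zs => exact pvRunsP_ne_nil z zs)

-- Source B's divide and conquer computes the linear run decomposition of the slice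
theorem pvSolveB_eq (items : List (Int × String × String × String)) :
    ∀ (fuel lo hi : Nat), hi - lo ≤ fuel → lo < hi → hi ≤ items.length →
      pvSolveB items lo hi = pvRunsP ((items.drop lo).take (hi - lo)) := by
  intro fuel
  induction fuel with
  | zero => intro lo hi h1 h2 _; omega
  | succ fuel ih =>
    intro lo hi h1 h2 h3
    by_cases hbase : hi - lo = 1
    · have hlt : lo < items.length := by omega
      rw [pvSolveB, if_pos hbase, hbase]
      have htake : (items.drop lo).take 1 = [items[lo]] := by
        rw [List.take_one, List.head?_drop, List.getElem?_eq_getElem hlt]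
        rfl
      rw [htake]
      simp [pvRunsP, pvComb, List.getD, List.getElem?_eq_getElem hlt]
    · have h2' : lo + 2 ≤ hi := by omega
      rw [pvSolveB, if_neg hbase, if_neg (by omega)]
      have hm1 : lo < (lo + hi) / 2 := by omega
      have hm2 : (lo + hi) / 2 < hi := by omega
      have hf1 : (lo + hi) / 2 - lo ≤ fuel := by omega
      have hf2 : hi - (lo + hi) / 2 ≤ fuel := by omega
      have hl1 : (lo + hi) / 2 ≤ items.length := by omega
      have hL := ih lo ((lo + hi) / 2) hf1 hm1 hl1
      have hR := ih ((lo + hi) / 2) hi hf2 hm2 h3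
      simp only [hL, hR]
      have hslice : (items.drop lo).take (hi - lo)
          = (items.drop lo).take ((lo + hi) / 2 - lo)
            ++ (items.drop ((lo + hi) / 2)).take (hi - (lo + hi) / 2) := by
        have he : hi - lo = ((lo + hi) / 2 - lo) + (hi - (lo + hi) / 2) := by omega
        have hX : lo + ((lo + hi) / 2 - lo) = (lo + hi) / 2 := by omega
        rw [he, List.take_add, List.drop_drop, hX]
      have hRne : (items.drop ((lo + hi) / 2)).take (hi - (lo + hi) / 2) ≠ [] := by
        have hmlt : (lo + hi) / 2 < items.length := by omega
        have : ((items.drop ((lo + hi) / 2)).take (hi - (lo + hi) / 2)).length ≠ 0 := by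
          simp only [List.length_take, List.length_drop]
          omega
        intro hnil
        exact this (by rw [hnil]; rfl)
      rw [hslice, pvRunsP_append _ _ hRne]
      rfl

-- A's sorted key list is the key projection of B's sorted item list
theorem pv_sorted_keys (adict : List (Int × String × String × String)) :
    PySem.List.sorted (PySem.Dict.keys (PySem.Dict.ofList adict)) (fun k => k) false
      = (PySem.List.sorted (PySem.Dict.items (PySem.Dict.ofList adict)) (fun kv => kv.1) false).map (fun y => y.1) := by
  have hperm : ((PySem.List.sorted (PySem.Dict.items (PySem.Dict.ofList adict)) (fun kv => kv.1) false).map (fun y => y.1)).Perm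
      (PySem.Dict.keys (PySem.Dict.ofList adict)) := by
    have h := (PySem.List.sorted_perm (PySem.Dict.items (PySem.Dict.ofList adict)) (fun kv => kv.1) false).map (fun y => y.1)
    simpa [PySem.Dict.keys] using h
  apply PySem.List.sorted_eq_of_perm_of_pairwise_lt _ _ _ hperm
  have h1 := PySem.List.sorted_map_key_pairwise (PySem.Dict.items (PySem.Dict.ofList adict)) (fun kv => kv.1)
  have h2 : ((PySem.List.sorted (PySem.Dict.items (PySem.Dict.ofList adict)) (fun kv => kv.1) false).map (fun y => y.1)).Nodup :=
    hperm.nodup_iff.mpr (PySem.Dict.nodup_keys_ofList adict)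
  exact (h1.and h2).imp (fun h => lt_of_le_of_ne h.1 h.2)

-- A's loop, once armed with a current phase, produces the projection of the linear run list
theorem pv_foldA (rest : List (Int × String × String × String)) (i j : Int) (p : String)
    (acc : List (Int × Int)) :
    (let st := rest.foldl
      (fun (st : Int × Int × Option String × List (Int × Int)) (y : Int × String × String × String) =>
        match st.2.2.1 with
        | none => (y.1, y.1, some y.2.2.2, st.2.2.2)
        | some q =>
          if q == y.2.2.2 then (st.1, y.1, some q, st.2.2.2)
          else (y.1, y.1, some y.2.2.2, st.2.2.2 ++ [(st.1, st.2.1)]))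
      (i, j, some p, acc)
     st.2.2.2 ++ [(st.1, st.2.1)])
      = acc ++ (pvComb i j p (pvRunsP rest)).map (fun r => (r.1, r.2.1)) := by
  induction rest generalizing i j p acc with
  | nil => simp [pvComb, pvRunsP]
  | cons z rest ih =>
    by_cases h : p == z.2.2.2
    · have hp : p = z.2.2.2 := beq_iff_eq.mp h
      simp only [List.foldl_cons, h, if_pos]
      rw [ih i z.1 p acc]
      congr 1
      -- pvComb i j p (pvRunsP (z::rest)) = pvComb i z.1 p (pvRunsP rest) when p = z.ph
      have : pvComb i j p (pvRunsP (z :: rest)) = pvComb i z.1 p (pvRunsP rest) := by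
        simp only [pvRunsP, ← hp]
        cases hL : pvRunsP rest with
        | nil => simp [pvComb]
        | cons r t =>
          by_cases hr : p == r.2.2
          · simp [pvComb, hr]
          · simp [pvComb, hr]
      rw [this]
    · simp only [List.foldl_cons, h, Bool.false_eq_true, if_false]
      rw [ih z.1 z.1 z.2.2.2 (acc ++ [(i, j)])]
      have hcomb : pvComb i j p (pvRunsP (z :: rest)) = (i, j, p) :: pvRunsP (z :: rest) := by
        obtain ⟨b, t, hz⟩ := pvComb_head z.1 z.1 z.2.2.2 (pvRunsP rest)
        have hz' : pvRunsP (z :: rest) = (z.1, b, z.2.2.2) :: t := by simp [pvRunsP, hz]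
        rw [hz']
        simp [pvComb, h]
      rw [hcomb]
      simp [pvRunsP]

-- ===== VERDICT (by name: the statement is the Claim_ definition above) =====
theorem find_longest_contig_spec : Claim_equal_find_longest_contig := by
  intro adict _
  unfold Spec_find_longest_contig
  simp only [find_longest_contig, find_longest_contig_alt]
  rw [pv_sorted_keys, List.foldl_map]
  rw [PySem.List.foldl_congr_mem _ _
    (fun (st : Int × Int × Option String × List (Int × Int)) (y : Int × String × String × String) =>
      match st.2.2.1 with
      | none => (y.1, y.1, some y.2.2.2, st.2.2.2)
      | some q =>
        if q == y.2.2.2 then (st.1, y.1, some q, st.2.2.2)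
        else (y.1, y.1, some y.2.2.2, st.2.2.2 ++ [(st.1, st.2.1)])) _
    (by
      intro acc y hy
      have hyi : y ∈ PySem.Dict.items (PySem.Dict.ofList adict) :=
        (PySem.List.mem_sorted _ _ _ _).1 hy
      have hg : PySem.Dict.getD (PySem.Dict.ofList adict) y.1 ("", "", "") = y.2 := by
        obtain ⟨k, v⟩ := y
        exact PySem.Dict.getD_of_mem_items _ hyi (PySem.Dict.nodup_keys_ofList adict) _
      simp only [hg])]
  cases hys : PySem.List.sorted (PySem.Dict.items (PySem.Dict.ofList adict)) (fun kv => kv.1) false with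
  | nil => rfl
  | cons y rest =>
    simp only [List.foldl_cons]
    have hA := pv_foldA rest y.1 y.1 y.2.2.2 []
    simp only [] at hA
    rw [hA, List.nil_append]
    have hB : pvSolveB (y :: rest) 0 (y :: rest).length = pvRunsP (y :: rest) := by
      have := pvSolveB_eq (y :: rest) (y :: rest).length 0 (y :: rest).length
        (by omega) (by simp) (le_refl _)
      simpa using this
    rw [hB]
    simp [pvRunsP]
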